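-- pv_equiv track=rewrite | github.com/linkaform/modules | restore_folios_produccion_pci/items/scripts/RestoreFoliosProduccionPCI/restore_folios_cobranza.py | mapear_folios_por_oc
-- ===== SOURCE A (Python) =====
-- def mapear_folios_por_oc(telefonos, folios_by_oc):
--     dict_fols_in_oc = {}
--     for telefono, folio in telefonos.items():
--         oc_found = 'no_oc'
--         for oc, folios_lib in folios_by_oc.items():
--             # Reviso si el telefono tiene el mismo folio en la OC y en el excel
--             if folios_lib.get(telefono, '') == folio:
--                 oc_found = oc
--                 break
--         dict_fols_in_oc.setdefault(oc_found, []).append(folio)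
--     return dict_fols_in_oc
-- ===== SOURCE B (Python) =====
-- def mapear_folios_por_oc(telefonos, folios_by_oc):
--     # Phase 1 (OC-major): assign each telefono to the first OC whose library matches its folio.
--     assigned = {}
--     for oc, folios_lib in folios_by_oc.items():
--         for telefono, folio in telefonos.items():
--             if telefono not in assigned and folios_lib.get(telefono, '') == folio:
--                 assigned[telefono] = oc
--     # Phase 2: bucket the folios by their assigned OC, in telefono order.
--     dict_fols_in_oc = {}
--     for telefono, folio in telefonos.items():
--         dict_fols_in_oc.setdefault(assigned.get(telefono, 'no_oc'), []).append(folio)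
--     return dict_fols_in_oc
-- ===== Notes on version B (the rewrite author's own statement) =====
-- stated objective: alternative
-- what changed: Replaced A's phone-major loop (inner scan over OCs with break per phone) by an OC-major assignment pass that maintains an 'assigned' phone->OC dict, followed by a separate telefono-order pass that buckets folios via that dict; Pre_ only excludes association lists with duplicate telefono keys, which cannot arise from a real Python dict argument.
import Mathlib
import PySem

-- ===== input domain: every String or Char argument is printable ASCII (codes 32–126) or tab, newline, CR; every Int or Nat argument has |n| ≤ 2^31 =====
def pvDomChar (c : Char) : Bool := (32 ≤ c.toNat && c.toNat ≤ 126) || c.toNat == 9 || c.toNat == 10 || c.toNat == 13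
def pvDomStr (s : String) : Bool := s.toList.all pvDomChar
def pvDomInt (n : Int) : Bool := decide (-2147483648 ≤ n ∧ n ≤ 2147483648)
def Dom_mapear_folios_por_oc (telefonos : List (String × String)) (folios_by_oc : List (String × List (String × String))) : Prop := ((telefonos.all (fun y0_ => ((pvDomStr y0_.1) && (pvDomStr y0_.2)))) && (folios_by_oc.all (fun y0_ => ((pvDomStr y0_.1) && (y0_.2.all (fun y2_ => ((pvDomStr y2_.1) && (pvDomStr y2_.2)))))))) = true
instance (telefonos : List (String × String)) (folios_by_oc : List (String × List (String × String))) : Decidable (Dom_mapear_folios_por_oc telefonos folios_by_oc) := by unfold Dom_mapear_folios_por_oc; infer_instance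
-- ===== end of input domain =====

-- B replaces A's phone-major search (inner scan over OCs with break, per phone) by an
-- OC-major assignment pass maintaining an 'assigned' map, followed by a separate
-- telefono-order bucketing pass (objective: alternative decomposition, same cost).

-- ===== PORT A =====
-- inner 'for oc, folios_lib in folios_by_oc.items(): … break' loop of A
def pvFindOC (telefono folio : String) (folios_by_oc : List (String × List (String × String))) : String :=
  match folios_by_oc with
  | [] => "no_oc"
  | (oc, folios_lib) :: rest =>
    if (PySem.Dict.mk folios_lib).getD telefono "" = folio then oc
    else pvFindOC telefono folio rest

def mapear_folios_por_oc (telefonos : List (String × String)) (folios_by_oc : List (String × List (String × String))) : List (String × List String) :=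
  (telefonos.foldl
    (fun d p => d.modify (pvFindOC p.1 p.2 folios_by_oc) [] (· ++ [p.2]))
    PySem.Dict.empty).items

-- ===== PORT B =====
def mapear_folios_por_oc_alt (telefonos : List (String × String)) (folios_by_oc : List (String × List (String × String))) : List (String × List String) :=
  -- Phase 1 (OC-major): assign each telefono to the first OC whose library matches its folio.
  let assigned : PySem.Dict String String :=
    folios_by_oc.foldl
      (fun a q =>
        telefonos.foldl
          (fun a p =>
            if a.contains p.1 = false ∧ (PySem.Dict.mk q.2).getD p.1 "" = p.2
            then a.insert p.1 q.1 else a)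
          a)
      PySem.Dict.empty
  -- Phase 2: bucket the folios by their assigned OC, in telefono order.
  (telefonos.foldl
    (fun d p => d.modify (assigned.getD p.1 "no_oc") [] (· ++ [p.2]))
    PySem.Dict.empty).items

-- ===== PRECONDITION & SPEC =====
-- Pre_ excludes association lists with a duplicate telefono key: such lists cannot arise
-- from a Python dict argument, and which entry wins there is an artefact of the encoding.
def Pre_mapear_folios_por_oc (telefonos : List (String × String)) (folios_by_oc : List (String × List (String × String))) : Prop :=
  (telefonos.map Prod.fst).Nodup

instance (telefonos : List (String × String)) (folios_by_oc : List (String × List (String × String))) : Decidable (Pre_mapear_folios_por_oc telefonos folios_by_oc) := by unfold Pre_mapear_folios_por_oc; infer_instance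

def pvWitness_mapear_folios_por_oc : (List (String × String)) × (List (String × List (String × String))) :=
  ([("t1", "f1"), ("t2", "f2")], [("oc1", [("t1", "f1")])])

def Spec_mapear_folios_por_oc (telefonos : List (String × String)) (folios_by_oc : List (String × List (String × String))) (out : List (String × List String)) : Prop := out = mapear_folios_por_oc_alt telefonos folios_by_oc
instance (telefonos : List (String × String)) (folios_by_oc : List (String × List (String × String))) (out : List (String × List String)) : Decidable (Spec_mapear_folios_por_oc telefonos folios_by_oc out) := by unfold Spec_mapear_folios_por_oc; infer_instance

-- ===== CLAIM (what is proved, stated in full; the proofs are below) =====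
def Claim_equal_mapear_folios_por_oc : Prop := ∀ (telefonos : List (String × String)) (folios_by_oc : List (String × List (String × String))), Dom_mapear_folios_por_oc telefonos folios_by_oc → Pre_mapear_folios_por_oc telefonos folios_by_oc → Spec_mapear_folios_por_oc telefonos folios_by_oc (mapear_folios_por_oc telefonos folios_by_oc)

-- ===== LEMMAS AND PROOFS =====

-- Option-valued first match, for stating the loop invariants of B's phase 1.
def pvFindOC? (telefono folio : String) (folios_by_oc : List (String × List (String × String))) : Option String :=
  match folios_by_oc with
  | [] => none
  | (oc, folios_lib) :: rest =>
    if (PySem.Dict.mk folios_lib).getD telefono "" = folio then some oc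
    else pvFindOC? telefono folio rest

lemma pvFindOC?_getD (telefono folio : String) (L : List (String × List (String × String))) :
    (pvFindOC? telefono folio L).getD "no_oc" = pvFindOC telefono folio L := by
  induction L with
  | nil => rfl
  | cons q rest ih =>
    obtain ⟨oc, lib⟩ := q
    simp only [pvFindOC?, pvFindOC]
    split_ifs with h
    · rfl
    · exact ih

-- With Nodup keys, a key determines its value.
lemma pv_key_det {α β : Type} (l : List (α × β)) (h : (l.map Prod.fst).Nodup)
    {p q : α × β} (hp : p ∈ l) (hq : q ∈ l) (hk : q.1 = p.1) : q.2 = p.2 := by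
  induction l with
  | nil => cases hp
  | cons x xs ih =>
    simp only [List.map_cons, List.nodup_cons] at h
    rcases List.mem_cons.1 hp with hp' | hp' <;> rcases List.mem_cons.1 hq with hq' | hq'
    · rw [hq', hp']
    · exfalso
      have h1 : q.1 = x.1 := by rw [hk, hp']
      have h2 : (q.1, q.2) ∈ xs := by simpa using hq'
      rw [h1] at h2
      exact h.1 (by simpa using List.mem_map_of_mem (f := Prod.fst) h2)
    · exfalso
      have h1 : p.1 = x.1 := by rw [← hk, hq']
      have h2 : (p.1, p.2) ∈ xs := by simpa using hp'
      rw [h1] at h2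
      exact h.1 (by simpa using List.mem_map_of_mem (f := Prod.fst) h2)
    · exact ih h.2 hp' hq'

-- Effect of one OC's inner pass of B's phase 1 on a single telefono's entry.
lemma pv_inner_get? (tel fol oc : String) (lib : List (String × String))
    (ts : List (String × String)) (a : PySem.Dict String String)
    (hval : ∀ p ∈ ts, p.1 = tel → p.2 = fol) :
    (ts.foldl
      (fun a p =>
        if a.contains p.1 = false ∧ (PySem.Dict.mk lib).getD p.1 "" = p.2
        then a.insert p.1 oc else a) a).get? tel
    = if a.contains tel = false ∧ tel ∈ ts.map Prod.fst ∧ (PySem.Dict.mk lib).getD tel "" = fol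
      then some oc else a.get? tel := by
  induction ts generalizing a with
  | nil => simp
  | cons p ts ih =>
    have hval' : ∀ q ∈ ts, q.1 = tel → q.2 = fol := fun q hq => hval q (List.mem_cons_of_mem _ hq)
    simp only [List.foldl_cons]
    by_cases hp : p.1 = tel
    · have hpv : p.2 = fol := hval p (List.mem_cons_self) hp
      subst hp; subst hpv
      by_cases hc : a.contains p.1 = false ∧ (PySem.Dict.mk lib).getD p.1 "" = p.2
      · rw [if_pos hc, ih _ hval']
        have h1 : (a.insert p.1 oc).contains p.1 = true := PySem.Dict.contains_insert_self a p.1 oc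
        rw [if_neg (by simp [h1]), PySem.Dict.get?_insert_self]
        rw [if_pos ⟨hc.1, by simp, hc.2⟩]
      · rw [if_neg hc, ih _ hval']
        push Not at hc
        by_cases h1 : a.contains p.1 = false
        · have h2 : ¬ (PySem.Dict.mk lib).getD p.1 "" = p.2 := fun h => hc h1 h
          rw [if_neg (by simp [h2]), if_neg (by simp [h2])]
        · rw [if_neg (by simp [h1]), if_neg (by simp [h1])]
    · -- p's key differs from tel: the step does not affect tel's entry
      have hg : ∀ (a' : PySem.Dict String String),
          (if a'.contains p.1 = false ∧ (PySem.Dict.mk lib).getD p.1 "" = p.2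
           then a'.insert p.1 oc else a').get? tel = a'.get? tel := by
        intro a'; split_ifs with h
        · exact PySem.Dict.get?_insert_of_ne a' oc (fun h' => hp h'.symm)
        · rfl
      have hcont : ∀ (a' : PySem.Dict String String),
          (if a'.contains p.1 = false ∧ (PySem.Dict.mk lib).getD p.1 "" = p.2
           then a'.insert p.1 oc else a').contains tel = a'.contains tel := by
        intro a'
        rw [PySem.Dict.contains_eq_isSome_get?, hg a', ← PySem.Dict.contains_eq_isSome_get?]
      rw [ih _ hval', hg a, hcont a]
      have hmem : tel ∈ (p :: ts).map Prod.fst ↔ tel ∈ ts.map Prod.fst := by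
        simp only [List.map_cons, List.mem_cons]
        constructor
        · rintro (h | h)
          · exact absurd h.symm hp
          · exact h
        · exact Or.inr
      by_cases hc : a.contains tel = false ∧ tel ∈ ts.map Prod.fst ∧ (PySem.Dict.mk lib).getD tel "" = fol
      · rw [if_pos hc, if_pos ⟨hc.1, hmem.2 hc.2.1, hc.2.2⟩]
      · rw [if_neg hc, if_neg (fun h => hc ⟨h.1, hmem.1 h.2.1, h.2.2⟩)]

-- Invariant of B's phase 1 over the OC list.
lemma pv_outer_get? (tel fol : String) (telefonos : List (String × String))
    (L : List (String × List (String × String))) (a : PySem.Dict String String)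
    (hval : ∀ p ∈ telefonos, p.1 = tel → p.2 = fol)
    (hmem : tel ∈ telefonos.map Prod.fst) :
    (L.foldl
      (fun a q =>
        telefonos.foldl
          (fun a p =>
            if a.contains p.1 = false ∧ (PySem.Dict.mk q.2).getD p.1 "" = p.2
            then a.insert p.1 q.1 else a) a) a).get? tel
    = if a.contains tel = false then pvFindOC? tel fol L else a.get? tel := by
  induction L generalizing a with
  | nil =>
    simp only [List.foldl_nil, pvFindOC?]
    split_ifs with h
    · cases hx : a.get? tel with
      | none => rfl
      | some v => rw [PySem.Dict.contains_eq_isSome_get?, hx] at h; simp at h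
    · rfl
  | cons q L ih =>
    obtain ⟨oc, lib⟩ := q
    simp only [List.foldl_cons]
    rw [ih _]
    set a' := telefonos.foldl
      (fun a p =>
        if a.contains p.1 = false ∧ (PySem.Dict.mk lib).getD p.1 "" = p.2
        then a.insert p.1 oc else a) a with ha'
    have hstep := pv_inner_get? tel fol oc lib telefonos a hval
    rw [← ha'] at hstep
    have hcont' : a'.contains tel = (a'.get? tel).isSome := PySem.Dict.contains_eq_isSome_get? a' tel
    by_cases hc : a.contains tel = false
    · simp only [pvFindOC?]
      by_cases hm : (PySem.Dict.mk lib).getD tel "" = fol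
      · have : a'.get? tel = some oc := by rw [hstep, if_pos ⟨hc, hmem, hm⟩]
        rw [if_neg (by rw [hcont', this]; simp), this, if_pos hm, if_pos hc]
      · have : a'.get? tel = a.get? tel := by rw [hstep, if_neg (by simp [hm])]
        have hc2 : a'.contains tel = false := by
          rw [hcont', this, ← PySem.Dict.contains_eq_isSome_get?, hc]
        rw [if_pos hc2, if_neg hm, if_pos hc]
    · have : a'.get? tel = a.get? tel := by rw [hstep, if_neg (by simp [hc])]
      have hc2 : a'.contains tel ≠ false := by
        rw [hcont', this, ← PySem.Dict.contains_eq_isSome_get?]; exact hc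
      rw [if_neg hc2, this, if_neg hc]

-- ===== VERDICT (by name: the statement is the Claim_ definition above) =====
theorem mapear_folios_por_oc_spec : Claim_equal_mapear_folios_por_oc := by
  intro telefonos folios_by_oc _ hpre
  unfold Spec_mapear_folios_por_oc
  unfold mapear_folios_por_oc mapear_folios_por_oc_alt
  congr 1
  apply PySem.List.foldl_congr_mem
  intro d p hp
  congr 1
  have hval : ∀ q ∈ telefonos, q.1 = p.1 → q.2 = p.2 :=
    fun q hq hk => pv_key_det telefonos hpre hp hq hk
  have hmem : p.1 ∈ telefonos.map Prod.fst := List.mem_map_of_mem hp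
  rw [PySem.Dict.getD_eq_get?_getD,
      pv_outer_get? p.1 p.2 telefonos folios_by_oc PySem.Dict.empty hval hmem,
      if_pos (by simp [PySem.Dict.contains_empty]), pvFindOC?_getD]
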